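-- pv_equiv track=rewrite | github.com/alex020160/konfig_practice_2 | konfig_2practice.py | transitive_dependencies
-- ===== SOURCE A (Python) =====
-- from collections import deque, defaultdict
-- from typing import Deque, Dict, Set, Tuple, Iterable, Callable
--
-- def transitive_dependencies(adj: Dict[str, list[str]], start: str) -> Set[str]:
--     seen: Set[str] = set()
--     q: Deque[str] = deque(adj.get(start, []))
--     while q:
--         u = q.popleft()
--         if u in seen:
--             continue
--         seen.add(u)
--         for v in adj.get(u, []):
--             if v not in seen:
--                 q.append(v)
--     return seen
-- ===== SOURCE B (Python) =====
-- def transitive_dependencies(adj, start):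
--     # Chaotic-iteration fixpoint: start from adj.get(start, []) and repeatedly
--     # sweep the whole adjacency mapping, adding targets of edges whose source
--     # is already in the set, until a full sweep changes nothing.
--     seen = set(adj.get(start, []))
--     changed = True
--     while changed:
--         changed = False
--         for u, vs in adj.items():
--             if u in seen:
--                 for v in vs:
--                     if v not in seen:
--                         seen.add(v)
--                         changed = True
--     return seen
-- ===== Notes on version B (the rewrite author's own statement) =====
-- stated objective: alternative
-- what changed: Replaces the deque-based BFS worklist with a worklist-free chaotic-iteration fixpoint: seed the set with adj.get(start, []) and repeatedly sweep the whole adjacency mapping, adding targets of edges out of already-included nodes, until a full sweep changes nothing.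
import Mathlib
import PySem

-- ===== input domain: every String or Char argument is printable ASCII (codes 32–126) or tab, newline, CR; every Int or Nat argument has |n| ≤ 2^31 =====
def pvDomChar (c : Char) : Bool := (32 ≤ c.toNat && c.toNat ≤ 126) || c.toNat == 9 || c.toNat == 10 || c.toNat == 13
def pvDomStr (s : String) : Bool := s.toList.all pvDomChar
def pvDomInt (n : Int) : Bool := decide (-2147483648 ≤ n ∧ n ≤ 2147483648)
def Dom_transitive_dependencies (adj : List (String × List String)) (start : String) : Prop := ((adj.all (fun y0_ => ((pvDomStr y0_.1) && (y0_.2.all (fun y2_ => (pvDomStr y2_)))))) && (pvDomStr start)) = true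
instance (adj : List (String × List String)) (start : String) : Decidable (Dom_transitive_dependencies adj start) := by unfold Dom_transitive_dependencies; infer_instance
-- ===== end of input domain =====

-- B replaces A's deque-based BFS worklist by a worklist-free chaotic-iteration fixpoint:
-- seed the set with adj.get(start, []) and repeatedly sweep the whole adjacency mapping,
-- adding targets of edges out of already-included nodes, until a sweep changes nothing.
-- Both Pythons return a SET; both ports return its canonical sorted-list representation
-- (set outputs are compared ignoring order).

-- ===== PORT A =====
-- adj.get(u, []) on the dict
def tdGet (adj : List (String × List String)) (u : String) : List String :=
  PySem.Dict.getD (PySem.Dict.mk adj) u []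

-- all values of the adjacency dict: every string that can ever be added to `seen`
-- (used only by the termination guards below)
def tdUniv (adj : List (String × List String)) : List String :=
  adj.flatMap (fun kv => kv.2)

-- termination measure: number of universe nodes not yet seen
def tdCnt (adj : List (String × List String)) (seen : PySem.Set String) : Nat :=
  ((tdUniv adj).filter (fun x => !(seen.contains x))).length

theorem td_contains_add (s : PySem.Set String) (u x : String) :
    (s.add u).contains x = (s.contains x || decide (x = u)) := by
  simp only [PySem.Set.add, PySem.Set.contains]
  split <;> simp_all

theorem tdCnt_lt_of_witness (adj : List (String × List String)) (s t : PySem.Set String)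
    (h : ∀ x, s.contains x = true → t.contains x = true) (w : String)
    (hwu : w ∈ tdUniv adj) (hwt : t.contains w = true) (hws : ¬ s.contains w = true) :
    tdCnt adj t < tdCnt adj s := by
  unfold tdCnt
  have hsub : ((tdUniv adj).filter (fun x => !(t.contains x))).Sublist
      ((tdUniv adj).filter (fun x => !(s.contains x))) := by
    refine List.monotone_filter_right _ ?_
    intro x hx
    cases hsx : s.contains x with
    | false => simp
    | true => have := h x hsx; simp only [this] at hx; exact absurd hx (by simp)
  refine Nat.lt_of_le_of_ne hsub.length_le (fun hlen => ?_)
  have heq := hsub.eq_of_length hlen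
  have hwsf : s.contains w = false := by
    cases hcs : s.contains w with
    | false => rfl
    | true => exact absurd hcs hws
  have hmem : w ∈ (tdUniv adj).filter (fun x => !(s.contains x)) :=
    List.mem_filter.2 ⟨hwu, by rw [hwsf]; rfl⟩
  rw [← heq, List.mem_filter] at hmem
  have h2 := hmem.2
  rw [hwt] at h2
  simp at h2

theorem tdCnt_add_lt (adj : List (String × List String)) (seen : PySem.Set String) (u : String)
    (hu : u ∈ tdUniv adj) (hn : ¬ seen.contains u = true) :
    tdCnt adj (seen.add u) < tdCnt adj seen := by
  refine tdCnt_lt_of_witness adj seen (seen.add u) ?_ u hu ?_ hn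
  · intro x hx; rw [td_contains_add, hx]; simp
  · rw [td_contains_add]; simp

-- the BFS loop of A: pop from the queue head, skip seen nodes, otherwise mark seen and
-- append the unseen neighbours at the queue's tail.  The `u ∈ tdUniv adj` guard only makes
-- the recursion total: every string that ever enters the queue is a value of `adj`, so on
-- reachable states the guard is always true and the branch skipping `u` is never taken.
def tdLoopA (adj : List (String × List String)) (seen : PySem.Set String) (q : List String) :
    PySem.Set String :=
  match q with
  | [] => seen
  | u :: rest =>
    if seen.contains u then tdLoopA adj seen rest
    else if _hu : u ∈ tdUniv adj then
      tdLoopA adj (seen.add u)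
        (rest ++ (tdGet adj u).filter (fun v => !((seen.add u).contains v)))
    else tdLoopA adj seen rest
termination_by (tdCnt adj seen, q.length)
decreasing_by
  · exact Prod.Lex.right _ (by simp)
  · exact Prod.Lex.left _ _ (tdCnt_add_lt adj seen u _hu (by simp_all))
  · exact Prod.Lex.right _ (by simp)

def transitive_dependencies (adj : List (String × List String)) (start : String) : List String :=
  PySem.List.sorted (tdLoopA adj PySem.Set.empty (tdGet adj start)) (fun x => x)

-- ===== PORT B =====
-- the inner `for v in vs: if v not in seen: seen.add(v); changed = True` loop;
-- state = (seen, changed)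
def tdInner (st : PySem.Set String × Bool) (v : String) : PySem.Set String × Bool :=
  if st.1.contains v then st else (st.1.add v, true)

-- one entry of the sweep: `if u in seen: <inner loop over vs>`
theorem tdInner_pos (st : PySem.Set String × Bool) (v : String)
    (hc : st.1.contains v = true) : tdInner st v = st := by
  unfold tdInner; rw [if_pos hc]

theorem tdInner_neg (st : PySem.Set String × Bool) (v : String)
    (hc : ¬ st.1.contains v = true) : tdInner st v = (st.1.add v, true) := by
  unfold tdInner; rw [if_neg hc]

def tdSweepStep (st : PySem.Set String × Bool) (p : String × List String) :
    PySem.Set String × Bool :=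
  if st.1.contains p.1 then p.2.foldl tdInner st else st

theorem tdSweepStep_pos (st : PySem.Set String × Bool) (p : String × List String)
    (hc : st.1.contains p.1 = true) : tdSweepStep st p = p.2.foldl tdInner st := by
  unfold tdSweepStep; rw [if_pos hc]

theorem tdSweepStep_neg (st : PySem.Set String × Bool) (p : String × List String)
    (hc : ¬ st.1.contains p.1 = true) : tdSweepStep st p = st := by
  unfold tdSweepStep; rw [if_neg hc]

-- facts about the inner fold, needed (only) to prove the sweep terminates the outer loop
theorem tdInner_mono (vs : List String) :
    ∀ (st : PySem.Set String × Bool) (x : String),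
      st.1.contains x = true → (vs.foldl tdInner st).1.contains x = true := by
  induction vs with
  | nil => intro st x h; exact h
  | cons v rest ih =>
    intro st x h
    rw [List.foldl_cons]
    by_cases hc : st.1.contains v = true
    · rw [tdInner_pos st v hc]; exact ih st x h
    · rw [tdInner_neg st v hc]
      refine ih _ x ?_
      show (st.1.add v).contains x = true
      rw [td_contains_add, h]; simp

theorem tdInner_sub (vs : List String) :
    ∀ (st : PySem.Set String × Bool) (x : String),
      (vs.foldl tdInner st).1.contains x = true → st.1.contains x = true ∨ x ∈ vs := by
  induction vs with
  | nil => intro st x h; exact Or.inl h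
  | cons v rest ih =>
    intro st x h
    rw [List.foldl_cons] at h
    by_cases hc : st.1.contains v = true
    · rw [tdInner_pos st v hc] at h
      rcases ih st x h with h' | h'
      · exact Or.inl h'
      · exact Or.inr (List.mem_cons_of_mem _ h')
    · rw [tdInner_neg st v hc] at h
      rcases ih _ x h with h' | h'
      · have h'' : (st.1.add v).contains x = true := h'
        rw [td_contains_add] at h''
        simp only [Bool.or_eq_true, decide_eq_true_eq] at h''
        rcases h'' with h3 | h3
        · exact Or.inl h3
        · exact Or.inr (by simp [h3])
      · exact Or.inr (List.mem_cons_of_mem _ h')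

theorem tdInner_flag_new (vs : List String) :
    ∀ (st : PySem.Set String × Bool), (vs.foldl tdInner st).2 = true →
      st.2 = true ∨ ∃ x, (vs.foldl tdInner st).1.contains x = true ∧ ¬ st.1.contains x = true := by
  induction vs with
  | nil => intro st h; exact Or.inl h
  | cons v rest ih =>
    intro st h
    rw [List.foldl_cons] at h ⊢
    by_cases hc : st.1.contains v = true
    · rw [tdInner_pos st v hc] at h ⊢
      exact ih st h
    · right
      refine ⟨v, ?_, hc⟩
      rw [tdInner_neg st v hc]
      refine tdInner_mono rest _ v ?_
      show (st.1.add v).contains v = true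
      rw [td_contains_add]; simp

theorem tdSweep_mono (l : List (String × List String)) :
    ∀ (st : PySem.Set String × Bool) (x : String),
      st.1.contains x = true → (l.foldl tdSweepStep st).1.contains x = true := by
  induction l with
  | nil => intro st x h; exact h
  | cons p rest ih =>
    intro st x h
    rw [List.foldl_cons]
    by_cases hc : st.1.contains p.1 = true
    · rw [tdSweepStep_pos st p hc]; exact ih _ x (tdInner_mono p.2 st x h)
    · rw [tdSweepStep_neg st p hc]; exact ih st x h

theorem tdSweep_sub (adj : List (String × List String)) :
    ∀ (l : List (String × List String)), (∀ p ∈ l, p ∈ adj) →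
      ∀ (st : PySem.Set String × Bool) (x : String),
        (l.foldl tdSweepStep st).1.contains x = true →
          st.1.contains x = true ∨ x ∈ tdUniv adj := by
  intro l
  induction l with
  | nil => intro _ st x h; exact Or.inl h
  | cons p rest ih =>
    intro hl st x h
    rw [List.foldl_cons] at h
    by_cases hc : st.1.contains p.1 = true
    · rw [tdSweepStep_pos st p hc] at h
      rcases ih (fun q hq => hl q (List.mem_cons_of_mem _ hq)) _ x h with h' | h'
      · rcases tdInner_sub p.2 st x h' with h'' | h''
        · exact Or.inl h''
        · refine Or.inr ?_
          unfold tdUniv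
          exact List.mem_flatMap.2 ⟨p, hl p List.mem_cons_self, h''⟩
      · exact Or.inr h'
    · rw [tdSweepStep_neg st p hc] at h
      exact ih (fun q hq => hl q (List.mem_cons_of_mem _ hq)) st x h

theorem tdSweep_flag_new (l : List (String × List String)) :
    ∀ (st : PySem.Set String × Bool), (l.foldl tdSweepStep st).2 = true →
      st.2 = true ∨ ∃ x, (l.foldl tdSweepStep st).1.contains x = true ∧
        ¬ st.1.contains x = true := by
  induction l with
  | nil => intro st h; exact Or.inl h
  | cons p rest ih =>
    intro st h
    rw [List.foldl_cons] at h ⊢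
    by_cases hc : st.1.contains p.1 = true
    · rw [tdSweepStep_pos st p hc] at h ⊢
      rcases ih _ h with h' | h'
      · rcases tdInner_flag_new p.2 st h' with h'' | h''
        · exact Or.inl h''
        · rcases h'' with ⟨x, hx1, hx2⟩
          exact Or.inr ⟨x, tdSweep_mono rest _ x hx1, hx2⟩
      · rcases h' with ⟨x, hx1, hx2⟩
        by_cases hxs : st.1.contains x = true
        · exact absurd (tdInner_mono p.2 st x hxs) hx2
        · exact Or.inr ⟨x, hx1, hxs⟩
    · rw [tdSweepStep_neg st p hc] at h ⊢
      exact ih st h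

-- one full `for u, vs in adj.items():` sweep, started with changed = False
def tdSweep (adj : List (String × List String)) (seen : PySem.Set String) :
    PySem.Set String × Bool :=
  ((PySem.Dict.mk adj).items).foldl tdSweepStep (seen, false)

theorem tdSweep_true_lt (adj : List (String × List String)) (seen : PySem.Set String)
    (h : (tdSweep adj seen).2 = true) : tdCnt adj (tdSweep adj seen).1 < tdCnt adj seen := by
  have hitems : (PySem.Dict.mk adj).items = adj := rfl
  rcases tdSweep_flag_new ((PySem.Dict.mk adj).items) (seen, false) h with h' | h'
  · simp at h'
  · rcases h' with ⟨x, hx1, hx2⟩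
    have hxu : x ∈ tdUniv adj := by
      rcases tdSweep_sub adj ((PySem.Dict.mk adj).items)
          (by rw [hitems]; exact fun p hp => hp) (seen, false) x hx1 with h'' | h''
      · exact absurd h'' hx2
      · exact h''
    exact tdCnt_lt_of_witness adj seen (tdSweep adj seen).1
      (fun y hy => tdSweep_mono _ _ y hy) x hxu hx1 hx2

-- the outer `while changed:` loop
def tdLoopB (adj : List (String × List String)) (seen : PySem.Set String) : PySem.Set String :=
  if h : (tdSweep adj seen).2 = true then tdLoopB adj (tdSweep adj seen).1
  else (tdSweep adj seen).1
termination_by tdCnt adj seen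
decreasing_by exact tdSweep_true_lt adj seen h

def transitive_dependencies_alt (adj : List (String × List String)) (start : String) :
    List String :=
  PySem.List.sorted (tdLoopB adj (PySem.Set.ofList (tdGet adj start))) (fun x => x)

-- ===== PRECONDITION & SPEC =====
-- Pre_ excludes association lists with duplicate keys: they represent no Python dict
-- (A's parameter IS a dict), so A is never called on them.
def Pre_transitive_dependencies (adj : List (String × List String)) (start : String) : Prop :=
  (adj.map Prod.fst).Nodup
instance (adj : List (String × List String)) (start : String) : Decidable (Pre_transitive_dependencies adj start) := by unfold Pre_transitive_dependencies; infer_instance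

def pvWitness_transitive_dependencies : (List (String × List String)) × String :=
  ([("a", ["b"]), ("b", ["c"])], "a")

def Spec_transitive_dependencies (adj : List (String × List String)) (start : String) (out : List String) : Prop := out = transitive_dependencies_alt adj start
instance (adj : List (String × List String)) (start : String) (out : List String) : Decidable (Spec_transitive_dependencies adj start out) := by unfold Spec_transitive_dependencies; infer_instance

-- ===== CLAIM (what is proved, stated in full; the proofs are below) =====
def Claim_equal_transitive_dependencies : Prop := ∀ (adj : List (String × List String)) (start : String), Dom_transitive_dependencies adj start → Pre_transitive_dependencies adj start → Spec_transitive_dependencies adj start (transitive_dependencies adj start)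

-- ===== LEMMAS AND PROOFS =====
-- reachability along adjacency edges
inductive tdReach (adj : List (String × List String)) : String → String → Prop
  | refl (u : String) : tdReach adj u u
  | head {u v w : String} : v ∈ tdGet adj u → tdReach adj v w → tdReach adj u w

theorem tdReach_trans {adj : List (String × List String)} {u v w : String}
    (h1 : tdReach adj u v) (h2 : tdReach adj v w) : tdReach adj u w := by
  induction h1 with
  | refl => exact h2
  | head he _ ih => exact tdReach.head he (ih h2)

theorem tdReach_snoc {adj : List (String × List String)} {u v w : String}
    (h1 : tdReach adj u v) (h2 : w ∈ tdGet adj v) : tdReach adj u w :=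
  tdReach_trans h1 (tdReach.head h2 (tdReach.refl w))

theorem tdGet_cons (k : String) (vs : List String) (rest : List (String × List String))
    (u : String) :
    tdGet ((k, vs) :: rest) u = if k == u then vs else tdGet rest u := by
  simp only [tdGet, PySem.Dict.getD_eq_get?_getD, PySem.Dict.get?_mk_cons]
  split <;> rfl

theorem tdGet_sub_univ (adj : List (String × List String)) (u v : String)
    (h : v ∈ tdGet adj u) : v ∈ tdUniv adj := by
  induction adj with
  | nil => simp [tdGet, PySem.Dict.getD_eq_get?_getD, PySem.Dict.get?, PySem.Dict.mk] at h
  | cons p rest ih =>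
    rw [show p = (p.1, p.2) from rfl, tdGet_cons] at h
    unfold tdUniv
    rw [List.flatMap_cons]
    split at h
    · exact List.mem_append_left _ h
    · exact List.mem_append_right _ (ih h)

theorem tdGet_of_mem (adj : List (String × List String)) (u : String) (vs : List String)
    (hnd : (adj.map Prod.fst).Nodup) (h : (u, vs) ∈ adj) : tdGet adj u = vs := by
  have hk : (PySem.Dict.mk adj).keys.Nodup := by
    simpa [PySem.Dict.keys] using hnd
  exact PySem.Dict.getD_of_mem_items (PySem.Dict.mk adj) h hk []

-- generic absorption: a set closed under adjacency contains everything reachable from it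
theorem td_absorb (adj : List (String × List String)) (T : PySem.Set String)
    (hcl : ∀ y, y ∈ T → ∀ z ∈ tdGet adj y, z ∈ T) {w x : String}
    (hw : w ∈ T) (hr : tdReach adj w x) : x ∈ T := by
  induction hr with
  | refl => exact hw
  | head he _ ih => exact ih (hcl _ hw _ he)

-- ----- A-side characterisation -----
theorem tdLoopA_mono (adj : List (String × List String)) (seen : PySem.Set String)
    (q : List String) : ∀ x ∈ seen, x ∈ tdLoopA adj seen q := by
  induction seen, q using tdLoopA.induct adj with
  | case1 seen => intro x hx; rw [tdLoopA]; exact hx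
  | case2 seen u rest hc ih =>
    intro x hx
    rw [tdLoopA, if_pos hc]
    exact ih x hx
  | case3 seen u rest hc hu ih =>
    intro x hx
    rw [tdLoopA, if_neg hc, dif_pos hu]
    exact ih x ((PySem.Set.mem_add seen u x).2 (Or.inl hx))
  | case4 seen u rest hc hu ih =>
    intro x hx
    rw [tdLoopA, if_neg hc, dif_neg hu]
    exact ih x hx

theorem tdLoopA_mem_q (adj : List (String × List String)) (seen : PySem.Set String)
    (q : List String) (hq : ∀ w ∈ q, w ∈ tdUniv adj) : ∀ w ∈ q, w ∈ tdLoopA adj seen q := by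
  induction seen, q using tdLoopA.induct adj with
  | case1 seen => intro w hw; simp at hw
  | case2 seen u rest hc ih =>
    intro w hw
    rw [tdLoopA, if_pos hc]
    rcases List.mem_cons.1 hw with h | h
    · subst h
      exact tdLoopA_mono adj seen rest w ((PySem.Set.contains_iff seen w).1 hc)
    · exact ih (fun y hy => hq y (List.mem_cons_of_mem _ hy)) w h
  | case3 seen u rest hc hu ih =>
    intro w hw
    rw [tdLoopA, if_neg hc, dif_pos hu]
    have hq' : ∀ y ∈ rest ++ (tdGet adj u).filter (fun v => !((seen.add u).contains v)),
        y ∈ tdUniv adj := by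
      intro y hy
      rcases List.mem_append.1 hy with h | h
      · exact hq y (List.mem_cons_of_mem _ h)
      · exact tdGet_sub_univ adj u y (List.mem_filter.1 h).1
    rcases List.mem_cons.1 hw with h | h
    · subst h
      exact tdLoopA_mono adj _ _ w ((PySem.Set.mem_add seen w w).2 (Or.inr rfl))
    · exact ih hq' w (List.mem_append_left _ h)
  | case4 seen u rest hc hu ih =>
    exact absurd (hq u List.mem_cons_self) hu

theorem tdLoopA_closed (adj : List (String × List String)) (seen : PySem.Set String)
    (q : List String) (hq : ∀ w ∈ q, w ∈ tdUniv adj) :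
    ∀ y, y ∈ tdLoopA adj seen q → y ∉ seen → ∀ z ∈ tdGet adj y, z ∈ tdLoopA adj seen q := by
  induction seen, q using tdLoopA.induct adj with
  | case1 seen =>
    intro y hy hyn
    rw [tdLoopA] at hy
    exact absurd hy hyn
  | case2 seen u rest hc ih =>
    intro y hy hyn z hz
    rw [tdLoopA, if_pos hc] at hy ⊢
    exact ih (fun w hw => hq w (List.mem_cons_of_mem _ hw)) y hy hyn z hz
  | case3 seen u rest hc hu ih =>
    intro y hy hyn z hz
    rw [tdLoopA, if_neg hc, dif_pos hu] at hy ⊢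
    have hq' : ∀ w ∈ rest ++ (tdGet adj u).filter (fun v => !((seen.add u).contains v)),
        w ∈ tdUniv adj := by
      intro w hw
      rcases List.mem_append.1 hw with h | h
      · exact hq w (List.mem_cons_of_mem _ h)
      · exact tdGet_sub_univ adj u w (List.mem_filter.1 h).1
    by_cases hyu : y = u
    · subst hyu
      by_cases hzs : z ∈ seen.add y
      · exact tdLoopA_mono adj _ _ z hzs
      · refine tdLoopA_mem_q adj _ _ hq' z (List.mem_append_right _ ?_)
        refine List.mem_filter.2 ⟨hz, ?_⟩
        simp only [Bool.not_eq_eq_eq_not, Bool.not_true]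
        cases hcz : (seen.add y).contains z with
        | false => rfl
        | true => exact absurd ((PySem.Set.contains_iff _ z).1 hcz) hzs
    · have hyn' : y ∉ seen.add u := by
        rw [PySem.Set.mem_add]
        rintro (h | h)
        · exact hyn h
        · exact hyu h
      exact ih hq' y hy hyn' z hz
  | case4 seen u rest hc hu ih =>
    exact absurd (hq u List.mem_cons_self) hu

theorem tdLoopA_sound (adj : List (String × List String)) (seen : PySem.Set String)
    (q : List String) :
    ∀ x ∈ tdLoopA adj seen q, x ∈ seen ∨ ∃ w ∈ q, tdReach adj w x := by
  induction seen, q using tdLoopA.induct adj with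
  | case1 seen => intro x hx; rw [tdLoopA] at hx; exact Or.inl hx
  | case2 seen u rest hc ih =>
    intro x hx
    rw [tdLoopA, if_pos hc] at hx
    rcases ih x hx with h | ⟨w, hw, hr⟩
    · exact Or.inl h
    · exact Or.inr ⟨w, List.mem_cons_of_mem _ hw, hr⟩
  | case3 seen u rest hc hu ih =>
    intro x hx
    rw [tdLoopA, if_neg hc, dif_pos hu] at hx
    rcases ih x hx with h | ⟨w, hw, hr⟩
    · rcases (PySem.Set.mem_add seen u x).1 h with h' | h'
      · exact Or.inl h'
      · subst h'
        exact Or.inr ⟨x, List.mem_cons_self, tdReach.refl x⟩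
    · rcases List.mem_append.1 hw with h' | h'
      · exact Or.inr ⟨w, List.mem_cons_of_mem _ h', hr⟩
      · exact Or.inr ⟨u, List.mem_cons_self, tdReach.head (List.mem_filter.1 h').1 hr⟩
  | case4 seen u rest hc hu ih =>
    intro x hx
    rw [tdLoopA, if_neg hc, dif_neg hu] at hx
    rcases ih x hx with h | ⟨w, hw, hr⟩
    · exact Or.inl h
    · exact Or.inr ⟨w, List.mem_cons_of_mem _ hw, hr⟩

theorem tdLoopA_nodup (adj : List (String × List String)) (seen : PySem.Set String)
    (q : List String) (h : seen.Nodup) : (tdLoopA adj seen q).Nodup := by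
  induction seen, q using tdLoopA.induct adj with
  | case1 seen => rw [tdLoopA]; exact h
  | case2 seen u rest hc ih =>
    rw [tdLoopA, if_pos hc]; exact ih h
  | case3 seen u rest hc hu ih =>
    rw [tdLoopA, if_neg hc, dif_pos hu]; exact ih (PySem.Set.nodup_add seen u h)
  | case4 seen u rest hc hu ih =>
    rw [tdLoopA, if_neg hc, dif_neg hu]; exact ih h

theorem tdLoopA_char (adj : List (String × List String)) (q : List String)
    (hq : ∀ w ∈ q, w ∈ tdUniv adj) (x : String) :
    x ∈ tdLoopA adj PySem.Set.empty q ↔ ∃ w ∈ q, tdReach adj w x := by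
  constructor
  · intro hx
    rcases tdLoopA_sound adj PySem.Set.empty q x hx with h | h
    · simp [PySem.Set.empty] at h
    · exact h
  · rintro ⟨w, hw, hr⟩
    refine td_absorb adj _ ?_ (tdLoopA_mem_q adj _ q hq w hw) hr
    intro y hy z hz
    exact tdLoopA_closed adj PySem.Set.empty q hq y hy (by simp [PySem.Set.empty]) z hz

-- ----- B-side characterisation -----
theorem tdInner_nodup (vs : List String) :
    ∀ (st : PySem.Set String × Bool), st.1.Nodup → (vs.foldl tdInner st).1.Nodup := by
  induction vs with
  | nil => intro st h; exact h
  | cons v rest ih =>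
    intro st h
    rw [List.foldl_cons]
    unfold tdInner
    split
    · exact ih st h
    · exact ih _ (PySem.Set.nodup_add st.1 v h)

theorem tdSweep_nodup (l : List (String × List String)) :
    ∀ (st : PySem.Set String × Bool), st.1.Nodup → (l.foldl tdSweepStep st).1.Nodup := by
  induction l with
  | nil => intro st h; exact h
  | cons p rest ih =>
    intro st h
    rw [List.foldl_cons]
    by_cases hc : st.1.contains p.1 = true
    · rw [tdSweepStep_pos st p hc]; exact ih _ (tdInner_nodup p.2 st h)
    · rw [tdSweepStep_neg st p hc]; exact ih st h

theorem tdLoopB_nodup (adj : List (String × List String)) (seen : PySem.Set String)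
    (h : seen.Nodup) : (tdLoopB adj seen).Nodup := by
  induction seen using tdLoopB.induct adj with
  | case1 seen hf ih =>
    rw [tdLoopB, dif_pos hf]
    exact ih (tdSweep_nodup _ _ h)
  | case2 seen hf =>
    rw [tdLoopB, dif_neg hf]
    exact tdSweep_nodup _ _ h

theorem tdLoopB_mono (adj : List (String × List String)) (seen : PySem.Set String) :
    ∀ x ∈ seen, x ∈ tdLoopB adj seen := by
  induction seen using tdLoopB.induct adj with
  | case1 seen hf ih =>
    intro x hx
    rw [tdLoopB, dif_pos hf]
    exact ih x ((PySem.Set.contains_iff _ x).1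
      (tdSweep_mono _ (seen, false) x ((PySem.Set.contains_iff seen x).2 hx)))
  | case2 seen hf =>
    intro x hx
    rw [tdLoopB, dif_neg hf]
    exact (PySem.Set.contains_iff _ x).1
      (tdSweep_mono _ (seen, false) x ((PySem.Set.contains_iff seen x).2 hx))

-- sweeps only add edge-successors of members: any adjacency-closed predicate is preserved
theorem tdSweep_pres (adj : List (String × List String)) (P : String → Prop)
    (hP : ∀ u v, P u → v ∈ tdGet adj u → P v) (hnd : (adj.map Prod.fst).Nodup) :
    ∀ (l : List (String × List String)), (∀ p ∈ l, p ∈ adj) →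
      ∀ (st : PySem.Set String × Bool), (∀ x ∈ st.1, P x) →
        ∀ x ∈ (l.foldl tdSweepStep st).1, P x := by
  intro l
  induction l with
  | nil => intro _ st hst x hx; exact hst x hx
  | cons p rest ih =>
    intro hl st hst x hx
    rw [List.foldl_cons] at hx
    by_cases hc : st.1.contains p.1 = true
    · rw [tdSweepStep_pos st p hc] at hx
      refine ih (fun q hq => hl q (List.mem_cons_of_mem _ hq)) _ ?_ x hx
      intro y hy
      rcases tdInner_sub p.2 st y ((PySem.Set.contains_iff _ y).2 hy) with h | h
      · exact hst y ((PySem.Set.contains_iff _ y).1 h)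
      · have hget : tdGet adj p.1 = p.2 :=
          tdGet_of_mem adj p.1 p.2 hnd (by
            have := hl p List.mem_cons_self; rwa [show p = (p.1, p.2) from rfl] at this)
        exact hP p.1 y (hst p.1 ((PySem.Set.contains_iff _ p.1).1 hc)) (hget ▸ h)
    · rw [tdSweepStep_neg st p hc] at hx
      exact ih (fun q hq => hl q (List.mem_cons_of_mem _ hq)) st hst x hx

theorem tdLoopB_pres (adj : List (String × List String)) (P : String → Prop)
    (hP : ∀ u v, P u → v ∈ tdGet adj u → P v) (hnd : (adj.map Prod.fst).Nodup)
    (seen : PySem.Set String) (hst : ∀ x ∈ seen, P x) :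
    ∀ x ∈ tdLoopB adj seen, P x := by
  induction seen using tdLoopB.induct adj with
  | case1 seen hf ih =>
    rw [tdLoopB, dif_pos hf]
    exact ih (tdSweep_pres adj P hP hnd _ (fun p hp => hp) (seen, false) hst)
  | case2 seen hf =>
    rw [tdLoopB, dif_neg hf]
    exact tdSweep_pres adj P hP hnd _ (fun p hp => hp) (seen, false) hst

theorem tdInner_flag_mono (vs : List String) :
    ∀ (st : PySem.Set String × Bool), st.2 = true → (vs.foldl tdInner st).2 = true := by
  induction vs with
  | nil => intro st h; exact h
  | cons v rest ih =>
    intro st h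
    rw [List.foldl_cons]
    by_cases hc : st.1.contains v = true
    · rw [tdInner_pos st v hc]; exact ih st h
    · rw [tdInner_neg st v hc]; exact ih _ rfl

theorem tdSweep_flag_mono (l : List (String × List String)) :
    ∀ (st : PySem.Set String × Bool), st.2 = true → (l.foldl tdSweepStep st).2 = true := by
  induction l with
  | nil => intro st h; exact h
  | cons p rest ih =>
    intro st h
    rw [List.foldl_cons]
    unfold tdSweepStep
    split
    · exact ih _ (tdInner_flag_mono p.2 st h)
    · exact ih st h

-- an unchanged inner fold added nothing and saw only members
theorem tdInner_flag_false (vs : List String) :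
    ∀ (st : PySem.Set String × Bool), (vs.foldl tdInner st).2 = false →
      (vs.foldl tdInner st).1 = st.1 ∧ ∀ v ∈ vs, v ∈ st.1 := by
  induction vs with
  | nil => intro st h; exact ⟨rfl, by simp⟩
  | cons v rest ih =>
    intro st h
    rw [List.foldl_cons] at h ⊢
    by_cases hc : st.1.contains v = true
    · rw [tdInner_pos st v hc] at h ⊢
      rcases ih st h with ⟨h1, h2⟩
      refine ⟨h1, ?_⟩
      intro w hw
      rcases List.mem_cons.1 hw with h' | h'
      · subst h'; exact (PySem.Set.contains_iff _ w).1 hc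
      · exact h2 w h'
    · rw [tdInner_neg st v hc] at h
      exact absurd (tdInner_flag_mono rest (st.1.add v, true) rfl) (by simp [h])

-- an unchanged sweep means the set is already closed under all adjacency entries
theorem tdSweep_flag_false (l : List (String × List String)) :
    ∀ (st : PySem.Set String × Bool), (l.foldl tdSweepStep st).2 = false →
      (l.foldl tdSweepStep st).1 = st.1 ∧
        ∀ p ∈ l, p.1 ∈ st.1 → ∀ v ∈ p.2, v ∈ st.1 := by
  induction l with
  | nil => intro st h; exact ⟨rfl, by simp⟩
  | cons p rest ih =>
    intro st h
    rw [List.foldl_cons] at h ⊢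
    by_cases hc : st.1.contains p.1 = true
    · rw [tdSweepStep_pos st p hc] at h ⊢
      rcases ih _ h with ⟨h1, h2⟩
      have hflag : (p.2.foldl tdInner st).2 = false := by
        cases hf : (p.2.foldl tdInner st).2 with
        | false => rfl
        | true => exact absurd (tdSweep_flag_mono rest _ hf) (by simp [h])
      rcases tdInner_flag_false p.2 st hflag with ⟨h3, h4⟩
      rw [h3] at h1 h2
      refine ⟨h1, ?_⟩
      intro q hq hq1 v hv
      rcases List.mem_cons.1 hq with h' | h'
      · subst h'; exact h4 v hv
      · exact h2 q h' hq1 v hv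
    · rw [tdSweepStep_neg st p hc] at h ⊢
      rcases ih st h with ⟨h1, h2⟩
      refine ⟨h1, ?_⟩
      intro q hq hq1 v hv
      rcases List.mem_cons.1 hq with h' | h'
      · subst h'
        exact absurd ((PySem.Set.contains_iff _ _).2 hq1) hc
      · exact h2 q h' hq1 v hv

theorem tdLoopB_closed (adj : List (String × List String)) (seen : PySem.Set String) :
    ∀ y ∈ tdLoopB adj seen, ∀ z ∈ tdGet adj y, z ∈ tdLoopB adj seen := by
  induction seen using tdLoopB.induct adj with
  | case1 seen hf ih =>
    rw [tdLoopB, dif_pos hf]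
    exact ih
  | case2 seen hf =>
    rw [tdLoopB, dif_neg hf]
    intro y hy z hz
    rcases tdSweep_flag_false _ (seen, false) (by simpa using hf) with ⟨h1, h2⟩
    have h1' : (tdSweep adj seen).1 = seen := h1
    rw [h1'] at hy ⊢
    -- relate tdGet to a pair of adj
    rcases hget : (PySem.Dict.mk adj).get? y with _ | vs
    · rw [tdGet, PySem.Dict.getD_eq_get?_getD, hget] at hz
      simp at hz
    · have hmem : (y, vs) ∈ adj := PySem.Dict.mem_items_of_get?_eq_some _ hget
      rw [tdGet, PySem.Dict.getD_eq_get?_getD, hget] at hz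
      exact h2 (y, vs) hmem hy z hz

theorem tdLoopB_char (adj : List (String × List String)) (q0 : List String)
    (hnd : (adj.map Prod.fst).Nodup) (x : String) :
    x ∈ tdLoopB adj (PySem.Set.ofList q0) ↔ ∃ w ∈ q0, tdReach adj w x := by
  constructor
  · intro hx
    refine tdLoopB_pres adj (fun y => ∃ w ∈ q0, tdReach adj w y) ?_ hnd _ ?_ x hx
    · rintro u v ⟨w, hw, hr⟩ he
      exact ⟨w, hw, tdReach_snoc hr he⟩
    · intro y hy
      exact ⟨y, (PySem.Set.mem_ofList q0 y).1 hy, tdReach.refl y⟩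
  · rintro ⟨w, hw, hr⟩
    exact td_absorb adj _ (tdLoopB_closed adj _)
      (tdLoopB_mono adj _ w ((PySem.Set.mem_ofList q0 w).2 hw)) hr

-- ===== VERDICT (by name: the statement is the Claim_ definition above) =====
theorem transitive_dependencies_spec : Claim_equal_transitive_dependencies := by
  intro adj start _ hpre
  unfold Spec_transitive_dependencies transitive_dependencies transitive_dependencies_alt
  refine PySem.List.sorted_eq_sorted_of_perm _ _ _ (fun a b h => h) ?_
  refine (List.perm_ext_iff_of_nodup
      (tdLoopA_nodup adj PySem.Set.empty _ (by simp [PySem.Set.empty]))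
      (tdLoopB_nodup adj _ (PySem.Set.nodup_ofList _))).2 ?_
  intro a
  rw [tdLoopA_char adj _ (fun w hw => tdGet_sub_univ adj start w hw) a,
    tdLoopB_char adj _ hpre a]
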